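-- pv_equiv track=rewrite | github.com/OriOrihuela/Codewars | Python_katas/katas_8kyu/i_love_you.py | how_much_i_love_you
-- ===== SOURCE A (Python) =====
-- def how_much_i_love_you(nb_petals):
--
--     list = ['I love you','a little','a lot', 'passionately', 'madly' ,'not at all']
--
--     pos = 0
--
--     for number in range(nb_petals):
--       answer = list[pos]
--       pos += 1
--       if pos == 6:
--         pos = 0
--     return answer
-- ===== SOURCE B (Python) =====
-- def how_much_i_love_you(nb_petals):
--     # O(1): the loop in A just computes cyclic index (nb_petals - 1) % 6
--     return ['I love you', 'a little', 'a lot', 'passionately',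
--             'madly', 'not at all'][(nb_petals - 1) % 6]
-- ===== Notes on version B (the rewrite author's own statement) =====
-- stated objective: faster
-- what changed: Replaces the O(n) simulation loop over range(nb_petals) with a single modular index (petals minus one, modulo the list length) into the phrase list.
-- outside the precondition, e.g. on how_much_i_love_you(0): A raises UnboundLocalError, B returns 'not at all'
import Mathlib
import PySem

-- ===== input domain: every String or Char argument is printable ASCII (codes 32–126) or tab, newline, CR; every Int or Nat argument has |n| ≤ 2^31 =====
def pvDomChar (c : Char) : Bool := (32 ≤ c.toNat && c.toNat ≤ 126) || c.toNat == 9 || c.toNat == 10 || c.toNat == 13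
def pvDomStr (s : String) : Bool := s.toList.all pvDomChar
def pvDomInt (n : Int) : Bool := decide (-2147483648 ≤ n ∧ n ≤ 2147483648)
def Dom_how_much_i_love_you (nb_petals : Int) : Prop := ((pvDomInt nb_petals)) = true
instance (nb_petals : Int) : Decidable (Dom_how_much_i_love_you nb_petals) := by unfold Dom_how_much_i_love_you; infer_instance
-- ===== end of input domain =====

-- B replaces A's O(n) petal-counting loop with a single O(1) modular index into the phrase list.


-- ===== PORT A =====
-- literal port: state is (pos, answer); answer starts unbound (none = UnboundLocalError)
def how_much_i_love_you (nb_petals : Int) : String :=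
  let lst := ["I love you", "a little", "a lot", "passionately", "madly", "not at all"]
  let st := (PySem.List.pyRange 0 nb_petals 1).foldl
    (fun (st : Int × Option String) _ =>
      let answer := PySem.List.pyGet? lst st.1
      let pos := st.1 + 1
      (if pos = 6 then 0 else pos, answer))
    (0, none)
  (st.2).getD ""

-- ===== PORT B =====
def how_much_i_love_you_alt (nb_petals : Int) : String :=
  let lst := ["I love you", "a little", "a lot", "passionately", "madly", "not at all"]
  (PySem.List.pyGet? lst (PySem.Int.mod (nb_petals - 1) 6)).getD ""

-- ===== PRECONDITION & SPEC =====
-- Pre_ excludes exactly nb_petals ≤ 0 (empty range), where A raises UnboundLocalError.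
def Pre_how_much_i_love_you (nb_petals : Int) : Prop := 1 ≤ nb_petals
instance (nb_petals : Int) : Decidable (Pre_how_much_i_love_you nb_petals) := by unfold Pre_how_much_i_love_you; infer_instance
def pvWitness_how_much_i_love_you : Int := 7

def Spec_how_much_i_love_you (nb_petals : Int) (out : String) : Prop := out = how_much_i_love_you_alt nb_petals
instance (nb_petals : Int) (out : String) : Decidable (Spec_how_much_i_love_you nb_petals out) := by unfold Spec_how_much_i_love_you; infer_instance

-- ===== CLAIM (what is proved, stated in full; the proofs are below) =====
def Claim_equal_how_much_i_love_you : Prop := ∀ (nb_petals : Int), Dom_how_much_i_love_you nb_petals → Pre_how_much_i_love_you nb_petals → Spec_how_much_i_love_you nb_petals (how_much_i_love_you nb_petals)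

-- ===== LEMMAS AND PROOFS =====

-- Loop invariant: after k+1 iterations pos = (k+1) % 6 and answer = lst[k % 6].
theorem how_much_loop_inv (k : Nat) :
    (PySem.List.pyRange 0 ((k : Int) + 1) 1).foldl
      (fun (st : Int × Option String) _ =>
        let answer := PySem.List.pyGet?
          ["I love you", "a little", "a lot", "passionately", "madly", "not at all"] st.1
        let pos := st.1 + 1
        (if pos = 6 then 0 else pos, answer))
      (0, none)
    = (((k : Int) + 1) % 6,
       PySem.List.pyGet?
         ["I love you", "a little", "a lot", "passionately", "madly", "not at all"]
         ((k : Int) % 6)) := by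
  induction k with
  | zero => decide
  | succ n ih =>
      have h1 : ((n : Int) + 1 + 1) = (((n : Int) + 1) + 1) := by ring
      have hsplit : PySem.List.pyRange 0 ((n : Int) + 1 + 1) 1
          = PySem.List.pyRange 0 ((n : Int) + 1) 1 ++ [(n : Int) + 1] := by
        rw [h1, PySem.List.pyRange_one_succ_right (by omega)]
      push_cast
      rw [hsplit, List.foldl_append, ih]
      have hpos : (if ((n : Int) + 1) % 6 + 1 = 6 then (0 : Int) else ((n : Int) + 1) % 6 + 1)
          = ((n : Int) + 1 + 1) % 6 := by
        split_ifs with h <;> omega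
      simp only [List.foldl_cons, List.foldl_nil]
      rw [hpos]

theorem how_much_i_love_you_spec : Claim_equal_how_much_i_love_you := by
  intro n _ hpre
  unfold Spec_how_much_i_love_you how_much_i_love_you how_much_i_love_you_alt
  have hk : n = ((n - 1).toNat : Int) + 1 := by
    unfold Pre_how_much_i_love_you at hpre; omega
  dsimp only
  rw [hk, how_much_loop_inv]
  have hm : PySem.Int.mod (((n - 1).toNat : Int) + 1 - 1) 6 = ((n - 1).toNat : Int) % 6 := by
    rw [PySem.Int.mod_eq_emod_of_pos (by omega)]; ring_nf
  simp only [hm]
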